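-- pv_equiv track=rewrite | github.com/Brunapupo/INE560-Introducao_a_Programacao_Orientada_a_Objetos | Lista11/0010.py | valores_negativos
-- ===== SOURCE A (Python) =====
-- def coluna_eh_positivo(matriz, coluna):
--    resultado = False
--    for linha in matriz:
--        if linha[coluna] > 0:
--            resultado = True
--    return resultado
--
-- def linha_eh_positivo(linha):
--    resultado = False
--    for i in linha:
--        if i > 0:
--            resultado = True
--    return resultado
--
-- def valores_negativos(matriz):
--    lista_negativos = []
--    for i in range(len(matriz)):
--        if not linha_eh_positivo(matriz[i]):
--            lista_negativos.append(f" A linha {i} possui apenas valores negativos")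
--        if not coluna_eh_positivo(matriz, i):
--            lista_negativos.append(f" A coluna {i} possui apenas valores negativos")
--
--    return lista_negativos
-- ===== SOURCE B (Python) =====
-- def valores_negativos(matriz):
--     n = len(matriz)
--     row_has_pos = [any(x > 0 for x in linha) for linha in matriz]
--     col_has_pos = [False] * n
--     for linha in matriz:
--         for j in range(n):
--             if linha[j] > 0:
--                 col_has_pos[j] = True
--     lista = []
--     for i in range(n):
--         if not row_has_pos[i]:
--             lista.append(f" A linha {i} possui apenas valores negativos")
--         if not col_has_pos[i]:
--             lista.append(f" A coluna {i} possui apenas valores negativos")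
--     return lista
-- ===== Notes on version B (the rewrite author's own statement) =====
-- stated objective: alternative
-- what changed: B precomputes two boolean flag lists (row_has_pos in one comprehension, col_has_pos in a single sweep over the rows) and then emits the interleaved messages from the flags, instead of A's per-index rescans of the whole matrix via helper functions.
import Mathlib
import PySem

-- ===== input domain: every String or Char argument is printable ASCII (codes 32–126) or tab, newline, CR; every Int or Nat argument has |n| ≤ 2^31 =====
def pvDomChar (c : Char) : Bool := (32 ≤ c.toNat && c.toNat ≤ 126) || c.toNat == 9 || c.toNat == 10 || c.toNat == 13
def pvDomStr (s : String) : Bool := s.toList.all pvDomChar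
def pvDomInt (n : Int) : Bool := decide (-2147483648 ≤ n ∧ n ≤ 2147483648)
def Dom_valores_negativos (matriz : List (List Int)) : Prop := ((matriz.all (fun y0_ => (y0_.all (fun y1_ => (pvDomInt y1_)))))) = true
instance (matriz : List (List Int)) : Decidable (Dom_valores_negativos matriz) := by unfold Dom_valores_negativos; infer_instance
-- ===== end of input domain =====

-- B replaces A's per-index full-matrix rescans by two precomputed boolean flag
-- lists (row/column has a positive entry) and one final flag-driven emit loop.

def linhaMsg (i : Int) : String :=
  " A linha " ++ PySem.Int.toStr i ++ " possui apenas valores negativos"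

def colunaMsg (i : Int) : String :=
  " A coluna " ++ PySem.Int.toStr i ++ " possui apenas valores negativos"

-- ===== PORT A =====
def coluna_eh_positivo (matriz : List (List Int)) (coluna : Int) : Bool :=
  matriz.foldl (fun resultado linha =>
    if PySem.List.pyGetD linha coluna 0 > 0 then true else resultado) false

def linha_eh_positivo (linha : List Int) : Bool :=
  linha.foldl (fun resultado i => if i > 0 then true else resultado) false

def valores_negativos (matriz : List (List Int)) : List String :=
  (PySem.List.pyRange 0 matriz.length 1).foldl (fun lista i =>
    let lista := if ¬ linha_eh_positivo (PySem.List.pyGetD matriz i []) then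
        lista ++ [linhaMsg i] else lista
    if ¬ coluna_eh_positivo matriz i then lista ++ [colunaMsg i] else lista) []

-- ===== PORT B =====
def rowHasPos (linha : List Int) : Bool := linha.any (fun x => x > 0)

-- one row of Source B's column sweep: col_has_pos[j] |= linha[j] > 0 for j < n
def colStep (n : Nat) (cols : List Bool) (linha : List Int) : List Bool :=
  (List.range n).map (fun j => cols.getD j false || decide (PySem.List.pyGetD linha (j : Int) 0 > 0))

def valores_negativos_alt (matriz : List (List Int)) : List String :=
  let n := matriz.length
  let rowPos := matriz.map rowHasPos
  let colPos := matriz.foldl (colStep n) (List.replicate n false)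
  (List.range n).foldl (fun lista i =>
    let lista := if ¬ rowPos.getD i false then lista ++ [linhaMsg (i : Int)] else lista
    if ¬ colPos.getD i false then lista ++ [colunaMsg (i : Int)] else lista) []

-- ===== PRECONDITION & SPEC =====
-- A raises IndexError (linha[coluna] in the column scan) exactly on ragged
-- matrices where some row is shorter than the number of rows; excluded here.
def Pre_valores_negativos (matriz : List (List Int)) : Prop :=
  ∀ linha ∈ matriz, matriz.length ≤ linha.length

instance (matriz : List (List Int)) : Decidable (Pre_valores_negativos matriz) := by
  unfold Pre_valores_negativos; infer_instance

def pvWitness_valores_negativos : List (List Int) := [[-1, 0], [0, -2]]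

def Spec_valores_negativos (matriz : List (List Int)) (out : List String) : Prop := out = valores_negativos_alt matriz
instance (matriz : List (List Int)) (out : List String) : Decidable (Spec_valores_negativos matriz out) := by unfold Spec_valores_negativos; infer_instance

-- ===== CLAIM (what is proved, stated in full; the proofs are below) =====
def Claim_equal_valores_negativos : Prop := ∀ (matriz : List (List Int)), Dom_valores_negativos matriz → Pre_valores_negativos matriz → Spec_valores_negativos matriz (valores_negativos matriz)

-- ===== LEMMAS AND PROOFS =====

-- A's sticky-flag loop is an 'any'.
lemma foldl_or_any {α : Type} (p : α → Prop) [DecidablePred p] (l : List α) (b : Bool) :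
    l.foldl (fun r x => if p x then true else r) b = (b || l.any (fun x => decide (p x))) := by
  induction l generalizing b with
  | nil => simp
  | cons x xs ih =>
    simp only [List.foldl_cons, List.any_cons, ih]
    by_cases h : p x <;> simp [h]

lemma linha_eh_positivo_eq (linha : List Int) :
    linha_eh_positivo linha = rowHasPos linha := by
  simpa [linha_eh_positivo, rowHasPos] using foldl_or_any (fun x : Int => x > 0) linha false

lemma coluna_eh_positivo_eq (matriz : List (List Int)) (coluna : Int) :
    coluna_eh_positivo matriz coluna
      = matriz.any (fun linha => decide (PySem.List.pyGetD linha coluna 0 > 0)) := by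
  simpa [coluna_eh_positivo] using
    foldl_or_any (fun linha : List Int => PySem.List.pyGetD linha coluna 0 > 0) matriz false

lemma colStep_getD (n : Nat) (cols : List Bool) (linha : List Int) {j : Nat} (hj : j < n) :
    (colStep n cols linha).getD j false
      = (cols.getD j false || decide (PySem.List.pyGetD linha (j : Int) 0 > 0)) := by
  simp [colStep, List.getD, hj]

lemma foldl_colStep_getD (n : Nat) (rs : List (List Int)) (cols : List Bool)
    {j : Nat} (hj : j < n) :
    (rs.foldl (colStep n) cols).getD j false
      = (cols.getD j false || rs.any (fun linha => decide (PySem.List.pyGetD linha (j : Int) 0 > 0))) := by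
  induction rs generalizing cols with
  | nil => simp
  | cons r rs ih =>
    simp only [List.foldl_cons, List.any_cons, ih, colStep_getD n cols r hj]
    rw [Bool.or_assoc]

lemma colPos_getD (matriz : List (List Int)) {j : Nat} (hj : j < matriz.length) :
    (matriz.foldl (colStep matriz.length) (List.replicate matriz.length false)).getD j false
      = matriz.any (fun linha => decide (PySem.List.pyGetD linha (j : Int) 0 > 0)) := by
  rw [foldl_colStep_getD matriz.length matriz _ hj]
  simp [List.getD, hj]

-- ===== VERDICT (by name: the statement is the Claim_ definition above) =====
theorem valores_negativos_spec : Claim_equal_valores_negativos := by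
  intro matriz _ _
  unfold Spec_valores_negativos valores_negativos valores_negativos_alt
  rw [PySem.List.pyRange_one]
  simp only [Int.sub_zero, Int.toNat_natCast, List.foldl_map]
  apply PySem.List.foldl_congr_mem
  intro acc i hi
  have hi' : i < matriz.length := List.mem_range.mp hi
  have hget : PySem.List.pyGetD matriz (i : Int) [] = matriz[i] := by
    simp [PySem.List.pyGetD_natCast, List.getD, hi']
  simp only [Int.zero_add]
  rw [hget, coluna_eh_positivo_eq, linha_eh_positivo_eq, colPos_getD matriz hi']
  simp [List.getD, List.getElem?_map, List.getElem?_eq_getElem hi']
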